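-- pv_equiv track=rewrite | github.com/artyomsol23/Python | matrix/build_shifted_matrix.py | build_shifted_matrix
-- ===== SOURCE A (Python) =====
-- def build_shifted_matrix(rows, cols, direction="left"):
--     """
--     Создаёт матрицу размером rows × cols с циклическим сдвигом в каждой строке.
--
--     Параметры:
--     - rows (int): количество строк в матрице
--     - cols (int): количество столбцов в матрице
--     - direction (str): направление сдвига ("left" - влево, "right" - вправо)
--                       (по умолчанию "left")
--
--     Возвращает:
--     - list: матрица с циклическим сдвигом в каждой строке
--
--     Пример:
--     >>> build_shifted_matrix(3, 4)
--     [[1, 2, 3, 4], [2, 3, 4, 1], [3, 4, 1, 2]]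
--     """
--     matrix = []
--
--     for i in range(rows):
--         # Создаём строку с циклическим сдвигом
--         if direction == "left":
--             # Сдвиг влево: каждый следующий элемент = (текущий индекс + номер строки) % cols + 1
--             shifted_row = [(j + i) % cols + 1 for j in range(cols)]
--         elif direction == "right":
--             # Сдвиг вправо: аналогично, но с обратным направлением
--             shifted_row = [(j - i) % cols + 1 for j in range(cols)]
--         else:
--             raise ValueError("Недопустимое направление сдвига. Используйте 'left' или 'right'")
--
--         matrix.append(shifted_row)
--
--     return matrix
-- ===== SOURCE B (Python) =====
-- def build_shifted_matrix(rows, cols, direction="left"):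
--     if rows <= 0:
--         return []
--     if direction != "left" and direction != "right":
--         raise ValueError("Недопустимое направление сдвига. Используйте 'left' или 'right'")
--     row = list(range(1, cols + 1))
--     matrix = [row]
--     for _ in range(rows - 1):
--         if direction == "left":
--             row = row[1:] + row[:1]
--         else:
--             row = row[-1:] + row[:-1]
--         matrix.append(row)
--     return matrix
-- ===== Notes on version B (the rewrite author's own statement) =====
-- stated objective: alternative
-- what changed: B builds the base row once and derives each subsequent row by a one-step cyclic rotation of the previous row (slice concatenation), instead of recomputing every element with the (j±i)%cols formula; validation is hoisted out of the loop behind an early return for rows<=0.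
import Mathlib
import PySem

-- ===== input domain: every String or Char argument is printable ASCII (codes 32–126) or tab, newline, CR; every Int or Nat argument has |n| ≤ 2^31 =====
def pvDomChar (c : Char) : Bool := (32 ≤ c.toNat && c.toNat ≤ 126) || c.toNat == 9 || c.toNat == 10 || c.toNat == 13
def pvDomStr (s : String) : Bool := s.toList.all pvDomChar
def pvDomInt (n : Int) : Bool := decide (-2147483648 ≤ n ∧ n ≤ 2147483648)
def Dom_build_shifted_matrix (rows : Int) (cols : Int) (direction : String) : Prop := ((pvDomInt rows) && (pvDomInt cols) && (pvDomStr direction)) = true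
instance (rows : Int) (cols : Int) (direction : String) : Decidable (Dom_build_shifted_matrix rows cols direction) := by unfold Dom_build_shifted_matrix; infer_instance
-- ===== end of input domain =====

-- B builds each row by rotating the previous one instead of A's per-element (j±i)%cols formula; alternative decomposition, same cost.
-- Pre_ excludes exactly the inputs where A raises ValueError (rows ≥ 1 with an invalid direction).


-- ===== PORT A =====
def build_shifted_matrix (rows : Int) (cols : Int) (direction : String) : List (List Int) :=
  (PySem.List.pyRange 0 rows 1).foldl (fun matrix i =>
    if direction == "left" then
      matrix ++ [(PySem.List.pyRange 0 cols 1).map (fun j => PySem.Int.mod (j + i) cols + 1)]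
    else if direction == "right" then
      matrix ++ [(PySem.List.pyRange 0 cols 1).map (fun j => PySem.Int.mod (j - i) cols + 1)]
    else
      matrix)  -- 'raise ValueError' in Python: excluded by Pre_build_shifted_matrix
    []

-- ===== PORT B =====
-- one-step cyclic rotation of a row (Source B's loop body): left = row[1:]+row[:1], right = row[-1:]+row[:-1]
def bsmRotate (direction : String) (row : List Int) : List Int :=
  if direction == "left" then
    PySem.List.slice row (some 1) none ++ PySem.List.slice row none (some 1)
  else
    PySem.List.slice row (some (-1)) none ++ PySem.List.slice row none (some (-1))

def build_shifted_matrix_alt (rows : Int) (cols : Int) (direction : String) : List (List Int) :=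
  if rows ≤ 0 then []
  else
    -- 'raise ValueError' for an invalid direction in Source B: excluded by Pre_build_shifted_matrix
    let base := PySem.List.pyRange 1 (cols + 1) 1
    ((PySem.List.pyRange 0 (rows - 1) 1).foldl
      (fun (st : List (List Int) × List Int) (_ : Int) =>
        let row := bsmRotate direction st.2
        (st.1 ++ [row], row))
      ([base], base)).1

-- ===== PRECONDITION & SPEC =====
-- Pre_ excludes exactly the inputs where the Python A raises ValueError: rows ≥ 1 with direction ∉ {"left","right"}.
def Pre_build_shifted_matrix (rows : Int) (cols : Int) (direction : String) : Prop :=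
  rows ≤ 0 ∨ direction = "left" ∨ direction = "right"
instance (rows : Int) (cols : Int) (direction : String) : Decidable (Pre_build_shifted_matrix rows cols direction) := by unfold Pre_build_shifted_matrix; infer_instance
def pvWitness_build_shifted_matrix : Int × Int × String := (3, 4, "left")

def Spec_build_shifted_matrix (rows : Int) (cols : Int) (direction : String) (out : List (List Int)) : Prop := out = build_shifted_matrix_alt rows cols direction
instance (rows : Int) (cols : Int) (direction : String) (out : List (List Int)) : Decidable (Spec_build_shifted_matrix rows cols direction out) := by unfold Spec_build_shifted_matrix; infer_instance

-- ===== CLAIM (what is proved, stated in full; the proofs are below) =====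
def Claim_equal_build_shifted_matrix : Prop := ∀ (rows : Int) (cols : Int) (direction : String), Dom_build_shifted_matrix rows cols direction → Pre_build_shifted_matrix rows cols direction → Spec_build_shifted_matrix rows cols direction (build_shifted_matrix rows cols direction)

-- ===== LEMMAS AND PROOFS =====

-- row i of A for direction "left" / "right"
def bsmRowL (cols i : Int) : List Int :=
  (PySem.List.pyRange 0 cols 1).map (fun j => PySem.Int.mod (j + i) cols + 1)
def bsmRowR (cols i : Int) : List Int :=
  (PySem.List.pyRange 0 cols 1).map (fun j => PySem.Int.mod (j - i) cols + 1)

lemma bsm_foldl_snoc (f : Int → List Int) (l : List Int) (acc : List (List Int)) :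
    l.foldl (fun m i => m ++ [f i]) acc = acc ++ l.map f := by
  induction l generalizing acc with
  | nil => simp
  | cons a l ih => simp [List.foldl_cons, ih]

lemma bsm_rowL_nonpos (cols i : Int) (h : cols ≤ 0) : bsmRowL cols i = [] := by
  simp [bsmRowL, PySem.List.pyRange_one_eq_nil h]
lemma bsm_rowR_nonpos (cols i : Int) (h : cols ≤ 0) : bsmRowR cols i = [] := by
  simp [bsmRowR, PySem.List.pyRange_one_eq_nil h]

lemma bsm_row_eq_range (cols : Int) (f : Int → Int) :
    (PySem.List.pyRange 0 cols 1).map (fun j => PySem.Int.mod (f j) cols + 1)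
      = (List.range cols.toNat).map (fun k : Nat => PySem.Int.mod (f (k : Int)) cols + 1) := by
  rw [PySem.List.pyRange_one, Int.sub_zero, List.map_map]
  apply List.map_congr_left
  intro k _
  simp [Function.comp]

lemma bsm_mod_add_self (i cols : Int) (hc : 0 < cols) :
    PySem.Int.mod (i + cols) cols = PySem.Int.mod i cols := by
  rw [PySem.Int.mod_eq_emod_of_pos hc, PySem.Int.mod_eq_emod_of_pos hc]
  simpa using Int.add_mul_emod_self_left (a := i) (b := cols) (c := 1)

lemma bsm_rot_core_left (g g' : Nat → Int) (m : Nat)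
    (hsucc : ∀ k, k < m → g' k = g (k + 1)) (hlast : g' m = g 0) :
    ((List.range (m + 1)).map g).tail ++ ((List.range (m + 1)).map g).take 1
      = (List.range (m + 1)).map g' := by
  conv_lhs => rw [List.range_succ_eq_map]
  conv_rhs => rw [List.range_succ]
  simp only [List.map_cons, List.map_append, List.map_map, List.tail_cons, List.map_singleton,
    List.map_nil, List.take_succ_cons, List.take_zero]
  congr 1
  · symm
    apply List.map_congr_left
    intro k hk
    rw [List.mem_range] at hk
    exact hsucc k hk
  · rw [hlast]

lemma bsm_rot_core_right (g g' : Nat → Int) (m : Nat)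
    (hsucc : ∀ k, k < m → g' (k + 1) = g k) (hfirst : g' 0 = g m) :
    ((List.range (m + 1)).map g).drop (((List.range (m + 1)).map g).length - 1)
      ++ ((List.range (m + 1)).map g).dropLast
      = (List.range (m + 1)).map g' := by
  conv_lhs => rw [List.range_succ]
  conv_rhs => rw [List.range_succ_eq_map]
  simp only [List.map_append, List.map_cons, List.map_singleton, List.map_nil, List.map_map,
    List.dropLast_concat, List.length_append, List.length_map, List.length_range,
    List.length_singleton, List.length_cons, List.length_nil]
  rw [List.drop_left' (by simp)]
  simp only [List.singleton_append, List.cons_append, List.nil_append]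
  congr 1
  · exact hfirst.symm
  · symm
    apply List.map_congr_left
    intro k hk
    rw [List.mem_range] at hk
    exact hsucc k hk

lemma bsm_rotL (cols i : Int) : bsmRotate "left" (bsmRowL cols i) = bsmRowL cols (i + 1) := by
  by_cases h : cols ≤ 0
  · simp [bsm_rowL_nonpos _ _ h, bsmRotate, PySem.List.slice]
  · replace h : 0 < cols := by omega
    unfold bsmRotate
    rw [if_pos (by rfl)]
    rw [PySem.List.slice_from_one, PySem.List.slice_to _ (by norm_num)]
    unfold bsmRowL
    rw [bsm_row_eq_range cols (· + i), bsm_row_eq_range cols (· + (i + 1))]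
    obtain ⟨m, hm⟩ : ∃ m, cols.toNat = m + 1 := ⟨cols.toNat - 1, by omega⟩
    have hcols : ((m : Int) + 1) = cols := by omega
    rw [hm, show ((1 : Int)).toNat = 1 from rfl]
    apply bsm_rot_core_left
    · intro k _
      congr 2
      push_cast
      ring
    · congr 1
      have : ((m : Int) + (i + 1)) = i + cols := by omega
      rw [this, bsm_mod_add_self _ _ h]
      norm_num

lemma bsm_rotR (cols i : Int) : bsmRotate "right" (bsmRowR cols i) = bsmRowR cols (i + 1) := by
  by_cases h : cols ≤ 0
  · simp [bsm_rowR_nonpos _ _ h, bsmRotate, PySem.List.slice]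
  · replace h : 0 < cols := by omega
    unfold bsmRotate
    rw [if_neg (by simp)]
    rw [PySem.List.slice_from_neg_one, PySem.List.slice_to_neg_one]
    unfold bsmRowR
    rw [bsm_row_eq_range cols (· - i), bsm_row_eq_range cols (· - (i + 1))]
    obtain ⟨m, hm⟩ : ∃ m, cols.toNat = m + 1 := ⟨cols.toNat - 1, by omega⟩
    have hcols : ((m : Int) + 1) = cols := by omega
    rw [hm]
    apply bsm_rot_core_right
    · intro k _
      congr 2
      push_cast
      ring
    · congr 1
      have hx : ((m : Int) - i) = (0 - (i + 1)) + cols := by omega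
      rw [Nat.cast_zero, hx, bsm_mod_add_self _ _ h]

lemma bsm_base_eq (cols : Int) (f : Int → Int) (hf : ∀ j, f j = j) :
    PySem.List.pyRange 1 (cols + 1) 1
      = (PySem.List.pyRange 0 cols 1).map (fun j => PySem.Int.mod (f j) cols + 1) := by
  rw [bsm_row_eq_range]
  by_cases h : cols ≤ 0
  · rw [PySem.List.pyRange_one_eq_nil (by omega)]
    simp [Int.toNat_of_nonpos h]
  · replace h : 0 < cols := by omega
    rw [PySem.List.pyRange_one]
    have : ((cols + 1) - 1).toNat = cols.toNat := by omega
    rw [this]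
    apply List.map_congr_left
    intro k hk
    rw [hf]
    rw [PySem.Int.mod_eq_emod_of_pos h, Int.emod_eq_of_lt (by omega)
      (by simp at hk; omega)]
    omega

lemma bsm_loop (rot : List Int → List Int) (row : Nat → List Int)
    (hrot : ∀ k, rot (row k) = row (k + 1)) :
    ∀ (l : List Int) (acc : List (List Int)) (i : Nat),
      l.foldl (fun (st : List (List Int) × List Int) (_ : Int) =>
          (st.1 ++ [rot st.2], rot st.2)) (acc, row i)
        = (acc ++ (List.range l.length).map (fun k => row (i + 1 + k)), row (i + l.length)) := by
  intro l
  induction l with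
  | nil => intro acc i; simp
  | cons a l ih =>
    intro acc i
    simp only [List.foldl_cons, hrot, ih (acc ++ [row (i + 1)]) (i + 1), List.length_cons,
      List.range_succ_eq_map, List.map_cons, List.map_map, Function.comp]
    simp only [Prod.mk.injEq]
    constructor
    · rw [List.append_assoc]
      congr 1
      rw [List.singleton_append]
      have hhead : row (i + 1 + 0) = row (i + 1) := by congr 1
      rw [hhead]
      congr 1
      apply List.map_congr_left
      intro k _
      show row (i + 1 + 1 + k) = row (i + 1 + (k + 1))
      congr 1
      omega
    · congr 1
      omega

-- A as a map of explicit row functions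
lemma bsm_A_left (rows cols : Int) :
    build_shifted_matrix rows cols "left"
      = (PySem.List.pyRange 0 rows 1).map (fun i => bsmRowL cols i) := by
  unfold build_shifted_matrix
  simp only [beq_self_eq_true, if_true]
  exact bsm_foldl_snoc _ _ _

lemma bsm_A_right (rows cols : Int) :
    build_shifted_matrix rows cols "right"
      = (PySem.List.pyRange 0 rows 1).map (fun i => bsmRowR cols i) := by
  unfold build_shifted_matrix
  simp only [show (("right" : String) == "left") = false by rfl, Bool.false_eq_true, if_false,
    beq_self_eq_true, if_true]
  exact bsm_foldl_snoc _ _ _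

lemma bsm_B_eq (rows cols : Int) (d : String) (row : Nat → List Int) (hrows : 0 < rows)
    (hbase : PySem.List.pyRange 1 (cols + 1) 1 = row 0)
    (hrot : ∀ k, bsmRotate d (row k) = row (k + 1)) :
    build_shifted_matrix_alt rows cols d = (List.range rows.toNat).map row := by
  unfold build_shifted_matrix_alt
  rw [if_neg (by omega)]
  simp only [hbase]
  rw [bsm_loop (bsmRotate d) row hrot (PySem.List.pyRange 0 (rows - 1) 1) [row 0] 0]
  simp only [PySem.List.length_pyRange_one]
  obtain ⟨m, hm⟩ : ∃ m, rows.toNat = m + 1 := ⟨rows.toNat - 1, by omega⟩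
  have hm' : (rows - 1 - 0).toNat = m := by omega
  rw [hm, hm', List.range_succ_eq_map]
  simp [List.map_map, Function.comp, Nat.add_comm]

-- ===== VERDICT (by name: the statement is the Claim_ definition above) =====
theorem build_shifted_matrix_spec : Claim_equal_build_shifted_matrix := by
  intro rows cols direction _ hpre
  unfold Spec_build_shifted_matrix
  by_cases hr : rows ≤ 0
  · unfold build_shifted_matrix build_shifted_matrix_alt
    rw [PySem.List.pyRange_one_eq_nil hr, if_pos hr]
    rfl
  · rcases hpre with hpre | hpre | hpre
    · omega
    · subst hpre
      rw [bsm_A_left, bsm_B_eq rows cols "left" (fun k => bsmRowL cols k) (by omega)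
        (bsm_base_eq cols (· + 0) (by simp)) (fun k => by
          have := bsm_rotL cols k; simpa using this)]
      rw [PySem.List.pyRange_one, Int.sub_zero, List.map_map]
      apply List.map_congr_left
      intro k _
      simp [Function.comp, bsmRowL]
    · subst hpre
      rw [bsm_A_right, bsm_B_eq rows cols "right" (fun k => bsmRowR cols k) (by omega)
        (bsm_base_eq cols (· - 0) (by simp)) (fun k => by
          have := bsm_rotR cols k; simpa using this)]
      rw [PySem.List.pyRange_one, Int.sub_zero, List.map_map]
      apply List.map_congr_left
      intro k _
      simp [Function.comp, bsmRowR]
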